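-- pv_equiv track=rewrite | github.com/IsabelaCaldeira/Sorbonne_TME | Semestre1/themes/theme7/baseDonnes.py | verif_elems
-- ===== SOURCE A (Python) =====
-- from typing import List
--
-- def presence(n : int, l: List[int]) -> bool:
--     """renvoie True si n est present sinon False"""
--     i : int
--     if len(l) == 0:
--         return False
--     for i in range(len(l)):
--         if l[i] == n:
--             return True
--     return False
--
-- def mat_presence(n: int, l1: List[List[int]]) -> bool:
--     """Retourne True si l’entier n est présent dans la liste ll ou False sinon"""
--     i : List[int]
--     for i in l1:
--         if presence(n, i):
--             return True
--     return False
--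
-- def verif_elems(n : int, l1 : List[List[int]]) -> bool:
--     """Pre n > 0
--     retourne True si tous les entiers dans l’intervalle [1; n × n] sont
-- présents dans la liste ll, ou False sinon."""
--
--     new_l : List[int] = [1]
--     i : int = 2
--     while i <= n * n:
--         new_l.append(i)
--         i = i + 1
--     j : int
--     for j in new_l:
--         if not (mat_presence(j,l1)):
--             return False
--     return True
-- ===== SOURCE B (Python) =====
-- def verif_elems(n, l1):
--     """Single pass over the matrix: collect the distinct values lying in
--     [1, n*n]; all targets are present iff that set has exactly n*n elements."""
--     target = n * n
--     seen = set()
--     for row in l1: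
--         for x in row:
--             if 1 <= x <= target:
--                 seen.add(x)
--     return len(seen) == target
-- ===== Notes on version B (the rewrite author's own statement) =====
-- stated objective: faster
-- what changed: Instead of rescanning the whole matrix for each target 1..n*n (A), B makes a single pass over the matrix collecting the distinct values in [1, n*n] into a set and checks that its size equals n*n.
-- intended difference: When n = 0 and 1 is absent from the matrix, A returns False (its accumulator is seeded with [1], so it demands 1 even though the interval [1, n*n] is empty), while B returns True, the intended vacuous answer. — e.g. on verif_elems(0, [[2]]): A returns false, B returns true
import Mathlib
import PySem

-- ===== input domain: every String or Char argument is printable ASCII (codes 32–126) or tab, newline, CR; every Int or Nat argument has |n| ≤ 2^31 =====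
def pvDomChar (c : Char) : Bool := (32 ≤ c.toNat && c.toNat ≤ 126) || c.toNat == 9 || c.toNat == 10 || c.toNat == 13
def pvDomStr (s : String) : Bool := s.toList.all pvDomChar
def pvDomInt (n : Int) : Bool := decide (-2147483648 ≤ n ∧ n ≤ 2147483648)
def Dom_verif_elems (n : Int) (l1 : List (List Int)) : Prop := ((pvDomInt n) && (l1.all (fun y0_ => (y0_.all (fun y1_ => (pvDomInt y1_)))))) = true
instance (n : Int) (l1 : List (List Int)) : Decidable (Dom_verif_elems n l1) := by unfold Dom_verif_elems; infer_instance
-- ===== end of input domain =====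

-- B makes one pass over the matrix collecting distinct values in [1, n*n] into a set
-- and compares its size with n*n, instead of A's rescan of the whole matrix per target.

-- ===== PORT A =====
-- for i in range(len(l)): if l[i] == n: return True
def presenceLoop (n : Int) : List Int → Bool
  | [] => false
  | x :: xs => if x == n then true else presenceLoop n xs

def presence (n : Int) (l : List Int) : Bool :=
  if l.length == 0 then false else presenceLoop n l

def mat_presence (n : Int) : List (List Int) → Bool
  | [] => false
  | r :: rs => if presence n r then true else mat_presence n rs

-- while i <= n*n: new_l.append(i); i = i + 1
-- (tail-recursive; new_l.append encoded as cons onto an accumulator reversed at the end)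
def buildLoop (m i : Int) (acc : List Int) : List Int :=
  if i ≤ m then buildLoop m (i + 1) (i :: acc) else acc.reverse
  termination_by (m + 1 - i).toNat
  decreasing_by omega

def checkLoop (l1 : List (List Int)) : List Int → Bool
  | [] => true
  | j :: js => if !(mat_presence j l1) then false else checkLoop l1 js

def verif_elems (n : Int) (l1 : List (List Int)) : Bool :=
  checkLoop l1 (buildLoop (n * n) 2 [1])

-- ===== PORT B =====
def verif_elems_alt (n : Int) (l1 : List (List Int)) : Bool :=
  let target := n * n
  let seen : PySem.Set Int :=
    l1.foldl (fun s row =>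
      row.foldl (fun s x => if 1 ≤ x ∧ x ≤ target then PySem.Set.add s x else s) s)
      PySem.Set.empty
  decide ((seen.length : Int) = target)

-- ===== PRECONDITION & SPEC =====
-- When n = 0 and 1 is absent from the matrix, A still demands the presence of 1
-- (its accumulator is seeded with [1]) and returns False, while B returns True,
-- the intended vacuous answer since the interval [1, n*n] is empty.
def D_verif_elems (n : Int) (l1 : List (List Int)) : Prop :=
  n = 0 ∧ ∀ r ∈ l1, (1 : Int) ∉ r
instance (n : Int) (l1 : List (List Int)) : Decidable (D_verif_elems n l1) := by
  unfold D_verif_elems; infer_instance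

def Spec_verif_elems (n : Int) (l1 : List (List Int)) (out : Bool) : Prop :=
  ¬ D_verif_elems n l1 → out = verif_elems_alt n l1
instance (n : Int) (l1 : List (List Int)) (out : Bool) : Decidable (Spec_verif_elems n l1 out) := by
  unfold Spec_verif_elems; infer_instance

def pvDiffWitness_verif_elems : Int × List (List Int) := (0, [[2]])
def pvDiffWitnessOut_verif_elems : Bool × Bool := (false, true)

-- ===== CLAIM (what is proved, stated in full; the proofs are below) =====
def Claim_unchanged_verif_elems : Prop := ∀ (n : Int) (l1 : List (List Int)), Dom_verif_elems n l1 → Spec_verif_elems n l1 (verif_elems n l1)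
def Claim_changed_verif_elems : Prop := Dom_verif_elems (pvDiffWitness_verif_elems.1) (pvDiffWitness_verif_elems.2) ∧ D_verif_elems (pvDiffWitness_verif_elems.1) (pvDiffWitness_verif_elems.2) ∧ verif_elems (pvDiffWitness_verif_elems.1) (pvDiffWitness_verif_elems.2) = pvDiffWitnessOut_verif_elems.1 ∧ verif_elems_alt (pvDiffWitness_verif_elems.1) (pvDiffWitness_verif_elems.2) = pvDiffWitnessOut_verif_elems.2 ∧ pvDiffWitnessOut_verif_elems.1 ≠ pvDiffWitnessOut_verif_elems.2
def Claim_exact_verif_elems : Prop := ∀ (n : Int) (l1 : List (List Int)), Dom_verif_elems n l1 → D_verif_elems n l1 → verif_elems n l1 ≠ verif_elems_alt n l1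

-- ===== LEMMAS AND PROOFS =====
theorem presenceLoop_iff (n : Int) (l : List Int) : presenceLoop n l = true ↔ n ∈ l := by
  induction l with
  | nil => simp [presenceLoop]
  | cons x xs ih => simp [presenceLoop, ih]; tauto

theorem presence_iff (n : Int) (l : List Int) : presence n l = true ↔ n ∈ l := by
  cases l <;> simp [presence, presenceLoop_iff, presenceLoop] <;> tauto

theorem mat_presence_iff (n : Int) (l1 : List (List Int)) :
    mat_presence n l1 = true ↔ ∃ r ∈ l1, n ∈ r := by
  induction l1 with
  | nil => simp [mat_presence]
  | cons r rs ih => simp [mat_presence, presence_iff, ih]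

theorem checkLoop_iff (l1 : List (List Int)) (js : List Int) :
    checkLoop l1 js = true ↔ ∀ j ∈ js, mat_presence j l1 = true := by
  induction js with
  | nil => simp [checkLoop]
  | cons j js ih => cases h : mat_presence j l1 <;> simp [checkLoop, h, ih]

theorem mem_buildLoop (m i j : Int) (acc : List Int) :
    j ∈ buildLoop m i acc ↔ j ∈ acc ∨ (i ≤ j ∧ j ≤ m) := by
  fun_induction buildLoop with
  | case1 i acc h ih =>
    rw [ih]
    simp only [List.mem_cons]
    constructor
    · rintro ((h1|h1)|h1)
      · right; omega
      · exact Or.inl h1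
      · right; omega
    · rintro (h1|h1)
      · exact Or.inl (Or.inr h1)
      · by_cases he : j = i
        · exact Or.inl (Or.inl he)
        · right; omega
  | case2 i acc h => simp; intro _; omega

theorem mem_row_fold (t : Int) (row : List Int) (s : PySem.Set Int) (x : Int) :
    x ∈ row.foldl (fun s y => if 1 ≤ y ∧ y ≤ t then PySem.Set.add s y else s) s ↔
      x ∈ s ∨ (x ∈ row ∧ 1 ≤ x ∧ x ≤ t) := by
  induction row generalizing s with
  | nil => simp
  | cons y ys ih =>
    simp only [List.foldl_cons, ih]
    split_ifs with h
    · simp only [PySem.Set.mem_add, List.mem_cons]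
      constructor
      · rintro ((h1|rfl)|⟨h1,h2⟩) <;> tauto
      · rintro (h1|⟨(rfl|h1),h2⟩) <;> tauto
    · simp only [List.mem_cons]
      constructor
      · rintro (h1|⟨h1,h2⟩) <;> tauto
      · rintro (h1|⟨(rfl|h1),h2⟩) <;> tauto

theorem nodup_row_fold (t : Int) (row : List Int) (s : PySem.Set Int) (hs : s.Nodup) :
    (row.foldl (fun s y => if 1 ≤ y ∧ y ≤ t then PySem.Set.add s y else s) s).Nodup := by
  induction row generalizing s with
  | nil => simpa
  | cons y ys ih =>
    simp only [List.foldl_cons]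
    split_ifs with h
    · exact ih _ (PySem.Set.nodup_add (s := s) (x := y) hs)
    · exact ih _ hs

theorem mem_seen (t : Int) (l1 : List (List Int)) (s : PySem.Set Int) (x : Int) :
    x ∈ l1.foldl (fun s row =>
        row.foldl (fun s y => if 1 ≤ y ∧ y ≤ t then PySem.Set.add s y else s) s) s ↔
      x ∈ s ∨ ((1 ≤ x ∧ x ≤ t) ∧ ∃ r ∈ l1, x ∈ r) := by
  induction l1 generalizing s with
  | nil => simp
  | cons r rs ih =>
    simp only [List.foldl_cons, ih, mem_row_fold, List.mem_cons]
    constructor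
    · rintro ((h1|⟨h1,h2⟩)|⟨h1,r',h2,h3⟩)
      · exact Or.inl h1
      · exact Or.inr ⟨h2, r, Or.inl rfl, h1⟩
      · exact Or.inr ⟨h1, r', Or.inr h2, h3⟩
    · rintro (h1|⟨h1,r',(rfl|h2),h3⟩)
      · exact Or.inl (Or.inl h1)
      · exact Or.inl (Or.inr ⟨h3, h1⟩)
      · exact Or.inr ⟨h1, r', h2, h3⟩

theorem nodup_seen (t : Int) (l1 : List (List Int)) (s : PySem.Set Int) (hs : s.Nodup) :
    (l1.foldl (fun s row =>
        row.foldl (fun s y => if 1 ≤ y ∧ y ≤ t then PySem.Set.add s y else s) s) s).Nodup := by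
  induction l1 generalizing s with
  | nil => simpa
  | cons r rs ih => exact ih _ (nodup_row_fold t r s hs)

theorem count_full (t : Int) (ht : 0 ≤ t) (s : List Int) (hnd : s.Nodup)
    (hb : ∀ x ∈ s, 1 ≤ x ∧ x ≤ t) :
    ((s.length : Int) = t ↔ ∀ j : Int, 1 ≤ j → j ≤ t → j ∈ s) := by
  have hsub : s.toFinset ⊆ Finset.Icc 1 t := by
    intro x hx
    simp only [List.mem_toFinset] at hx
    simp only [Finset.mem_Icc]
    exact hb x hx
  have hcardI : (Finset.Icc (1:Int) t).card = t.toNat := by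
    rw [Int.card_Icc]; omega
  have hcards : s.toFinset.card = s.length := List.toFinset_card_of_nodup hnd
  constructor
  · intro hlen j h1 h2
    have : s.toFinset = Finset.Icc 1 t := by
      apply Finset.eq_of_subset_of_card_le hsub
      rw [hcardI, hcards]; omega
    have : j ∈ s.toFinset := by rw [this]; simp [Finset.mem_Icc]; omega
    simpa using this
  · intro hall
    have hsup : Finset.Icc (1:Int) t ⊆ s.toFinset := by
      intro j hj
      simp only [Finset.mem_Icc] at hj
      simp only [List.mem_toFinset]
      exact hall j hj.1 hj.2
    have : s.toFinset = Finset.Icc 1 t := Finset.Subset.antisymm hsub hsup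
    have := congrArg Finset.card this
    rw [hcards, hcardI] at this
    omega

theorem alt_iff (n : Int) (l1 : List (List Int)) :
    verif_elems_alt n l1 = true ↔ ∀ j : Int, 1 ≤ j → j ≤ n * n → ∃ r ∈ l1, j ∈ r := by
  unfold verif_elems_alt
  simp only [decide_eq_true_iff]
  have ht : (0:Int) ≤ n * n := mul_self_nonneg n
  have hnd := nodup_seen (n * n) l1 PySem.Set.empty List.nodup_nil
  have hb : ∀ x ∈ l1.foldl (fun s row =>
      row.foldl (fun s y => if 1 ≤ y ∧ y ≤ n * n then PySem.Set.add s y else s) s)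
      PySem.Set.empty, 1 ≤ x ∧ x ≤ n * n := by
    intro x hx
    rcases (mem_seen (n * n) l1 PySem.Set.empty x).1 hx with h | ⟨h, _⟩
    · simp [PySem.Set.empty] at h
    · exact h
  rw [count_full (n * n) ht _ hnd hb]
  constructor
  · intro h j hj1 hj2
    rcases (mem_seen (n * n) l1 PySem.Set.empty j).1 (h j hj1 hj2) with h' | ⟨_, h'⟩
    · simp [PySem.Set.empty] at h'
    · exact h'
  · intro h j hj1 hj2
    exact (mem_seen (n * n) l1 PySem.Set.empty j).2 (Or.inr ⟨⟨hj1, hj2⟩, h j hj1 hj2⟩)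

theorem a_iff (n : Int) (l1 : List (List Int)) :
    verif_elems n l1 = true ↔
      ((∃ r ∈ l1, (1 : Int) ∈ r) ∧ ∀ j : Int, 2 ≤ j → j ≤ n * n → ∃ r ∈ l1, j ∈ r) := by
  unfold verif_elems
  rw [checkLoop_iff]
  constructor
  · intro h
    refine ⟨(mat_presence_iff 1 l1).1 (h 1 (by simp [mem_buildLoop])), fun j hj1 hj2 => ?_⟩
    exact (mat_presence_iff j l1).1 (h j (by simp [mem_buildLoop]; omega))
  · rintro ⟨h1, h2⟩ j hj
    rcases (mem_buildLoop (n * n) 2 j [1]).1 hj with he | hb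
    · simp at he; subst he; exact (mat_presence_iff 1 l1).2 h1
    · exact (mat_presence_iff j l1).2 (h2 j hb.1 hb.2)

-- ===== VERDICT (by name: the statement is the Claim_ definition above) =====
theorem verif_elems_spec : Claim_unchanged_verif_elems := by
  intro n l1 _ hD
  rw [Bool.eq_iff_iff, a_iff, alt_iff]
  constructor
  · rintro ⟨h1, h2⟩ j hj1 hj2
    by_cases h : 2 ≤ j
    · exact h2 j h hj2
    · have : j = 1 := by omega
      subst this; exact h1
  · intro h
    refine ⟨?_, fun j hj1 hj2 => h j (by omega) hj2⟩
    by_cases hn : n = 0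
    · simp only [D_verif_elems, not_and, not_forall] at hD
      rcases hD hn with ⟨r, hr, hmem⟩
      exact ⟨r, hr, not_not.1 hmem⟩
    · have ht0 : n * n ≠ 0 := fun h' => hn (mul_self_eq_zero.1 h')
      have ht : (0:Int) ≤ n * n := mul_self_nonneg n
      exact h 1 le_rfl (by omega)

theorem verif_elems_changed : Claim_changed_verif_elems := by
  unfold Claim_changed_verif_elems
  refine ⟨by decide, by decide, ?_, ?_, by decide⟩
  · show verif_elems 0 [[2]] = false
    rw [Bool.eq_false_iff]
    intro h
    rcases ((a_iff 0 [[2]]).1 h).1 with ⟨r, hr, hmem⟩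
    simp at hr
    subst hr
    simp at hmem
  · show verif_elems_alt 0 [[2]] = true
    exact (alt_iff 0 [[2]]).2 (fun j hj1 hj2 => absurd hj2 (by omega))

theorem verif_elems_tight : Claim_exact_verif_elems := by
  intro n l1 _ hD
  rcases hD with ⟨rfl, h1⟩
  have hB : verif_elems_alt 0 l1 = true :=
    (alt_iff 0 l1).2 (fun j hj1 hj2 => absurd hj2 (by omega))
  have hA : verif_elems 0 l1 ≠ true := fun h => by
    rcases ((a_iff 0 l1).1 h).1 with ⟨r, hr, hmem⟩
    exact h1 r hr hmem
  simp only [hB]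
  exact hA
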